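-- pv_equiv track=rewrite | github.com/asri-mohammad/Deductions-app | src/functionality/util/commonUtil.py | reorder_column
-- ===== SOURCE A (Python) =====
-- def reorder_column(matrix, column_order):
--     """given a matrix-like variable reorders the variable column, column_order index starting from 0"""
--
--     new_matrix = []
--     for row in matrix:
--         new_row = [None for i in range(0, len(matrix[0]))]
--         for i, c in enumerate(row):
--             new_row[column_order[i]] = c
--         new_matrix.append(new_row)
--     return new_matrix
-- ===== SOURCE B (Python) =====
-- def reorder_column(matrix, column_order):
--     """given a matrix-like variable reorders the variable column, column_order index starting from 0"""
--     if not matrix: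
--         return []
--     n = len(matrix[0])
--     # split the matrix into its columns, placing source column i at position column_order[i]
--     cols = [None] * n
--     for i in range(n):
--         cols[column_order[i]] = [row[i] for row in matrix]
--     # reassemble the rows from the reordered columns
--     return [[col[r] for col in cols] for r in range(len(matrix))]
-- ===== Notes on version B (the rewrite author's own statement) =====
-- stated objective: alternative
-- what changed: B works column-major instead of A's row-major scatter: it splits the matrix into columns, places whole columns at their target positions, and transposes back into rows; Pre_ excludes ragged matrices and column orders that are not a permutation of the columns, on which A raises IndexError or returns rows still containing Python's None.
-- outside the precondition, e.g. on reorder_column([[1, 2]], [0, 0]): A returns [[2, None]], B raises TypeError; on reorder_column([[1, 2], [3]], [0, 1]): A returns [[1, 2], [3, None]], B raises IndexError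
import Mathlib
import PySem

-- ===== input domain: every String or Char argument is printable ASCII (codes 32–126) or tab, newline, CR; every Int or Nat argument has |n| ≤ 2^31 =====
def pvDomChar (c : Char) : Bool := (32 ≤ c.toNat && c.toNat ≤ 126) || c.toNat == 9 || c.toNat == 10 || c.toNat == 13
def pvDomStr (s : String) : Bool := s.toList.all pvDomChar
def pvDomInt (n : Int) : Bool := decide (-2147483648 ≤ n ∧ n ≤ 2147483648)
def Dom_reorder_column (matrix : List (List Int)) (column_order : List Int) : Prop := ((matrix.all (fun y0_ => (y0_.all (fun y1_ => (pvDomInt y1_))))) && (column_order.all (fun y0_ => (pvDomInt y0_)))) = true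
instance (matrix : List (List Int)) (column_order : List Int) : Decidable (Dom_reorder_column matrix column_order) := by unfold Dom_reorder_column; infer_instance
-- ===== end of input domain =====

-- B is column-major where A is row-major: it splits the matrix into columns, places each whole
-- column at its target position, and transposes back; same cost, different traversal.
-- Return values only; neither version mutates its arguments.

-- ===== PORT A =====
def reorder_column (matrix : List (List Int)) (column_order : List Int) : List (List Int) :=
  -- new_matrix = []; for row in matrix: …; new_matrix.append(new_row)
  matrix.foldl (fun new_matrix row =>
      -- new_row = [None for i in range(0, len(matrix[0]))]
      let new_row0 : List (Option Int) :=
        (PySem.List.pyRange 0 (((matrix.headD []).length : Int)) 1).map (fun _ => (none : Option Int))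
      -- for i, c in enumerate(row): new_row[column_order[i]] = c
      -- pyGetD / pySetD are the total forms of column_order[i] / new_row[...] = c: the out-of-range
      -- cases raise IndexError in Python and are exactly what Pre_ excludes
      let new_row := (PySem.List.enumerate row).foldl
        (fun nr p => PySem.List.pySetD nr (PySem.List.pyGetD column_order p.1 0) (some p.2)) new_row0
      -- the .map strips the Option: under Pre_ every cell has been written, so no Python None survives
      new_matrix ++ [new_row.map (fun o => o.getD 0)]) []

-- ===== PORT B =====
def reorder_column_alt (matrix : List (List Int)) (column_order : List Int) : List (List Int) :=
  if matrix.isEmpty then [] else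
    let n : Nat := (matrix.headD []).length
    -- cols = [None] * n; for i in range(n): cols[column_order[i]] = [row[i] for row in matrix]
    -- pyGetD/pySetD are the total forms of the Python indexings (IndexError cases excluded by Pre_)
    let cols : List (Option (List Int)) :=
      (PySem.List.pyRange 0 (n : Int) 1).foldl
        (fun cols i => PySem.List.pySetD cols (PySem.List.pyGetD column_order i 0)
            (some (matrix.map (fun row => PySem.List.pyGetD row i 0))))
        (List.replicate n none)
    -- [[col[r] for col in cols] for r in range(len(matrix))]; under Pre_ no col is None,
    -- so the Option is stripped with getD (Python would raise TypeError on a None column)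
    (PySem.List.pyRange 0 ((matrix.length : Int)) 1).map (fun r =>
      cols.map (fun col => PySem.List.pyGetD (col.getD []) r 0))

-- ===== PRECONDITION & SPEC =====
-- Pre_ excludes ragged matrices and column orders whose first len(matrix[0]) entries are not an
-- in-range (possibly negatively indexed) permutation of the columns: on those inputs A raises
-- IndexError, returns rows containing Python's None (no value of the declared type), or its value
-- depends on the accidental overwrite order of duplicate target columns.
def Pre_reorder_column (matrix : List (List Int)) (column_order : List Int) : Prop :=
  (∀ row ∈ matrix, row.length = (matrix.headD []).length) ∧
  (matrix.headD []).length ≤ column_order.length ∧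
  (∀ i < (matrix.headD []).length,
      -(((matrix.headD []).length : Int)) ≤ column_order.getD i 0 ∧
      column_order.getD i 0 < (matrix.headD []).length) ∧
  ((List.range (matrix.headD []).length).map (fun i =>
      if column_order.getD i 0 < 0 then column_order.getD i 0 + (matrix.headD []).length
      else column_order.getD i 0)).Nodup

instance (matrix : List (List Int)) (column_order : List Int) : Decidable (Pre_reorder_column matrix column_order) := by
  unfold Pre_reorder_column; infer_instance

def pvWitness_reorder_column : List (List Int) × List Int := ([[1, 2, 3], [4, 5, 6]], [2, 0, -2])

def Spec_reorder_column (matrix : List (List Int)) (column_order : List Int) (out : List (List Int)) : Prop := out = reorder_column_alt matrix column_order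
instance (matrix : List (List Int)) (column_order : List Int) (out : List (List Int)) : Decidable (Spec_reorder_column matrix column_order out) := by unfold Spec_reorder_column; infer_instance

-- ===== CLAIM (what is proved, stated in full; the proofs are below) =====
def Claim_equal_reorder_column : Prop := ∀ (matrix : List (List Int)) (column_order : List Int), Dom_reorder_column matrix column_order → Pre_reorder_column matrix column_order → Spec_reorder_column matrix column_order (reorder_column matrix column_order)

-- ===== LEMMAS AND PROOFS =====

-- Python's l[i] = v for -len(l) ≤ i < len(l), as a plain List.set at the normalised index
theorem pySetD_norm {α : Type} (l : List α) (i : Int) (v : α)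
    (h1 : -(l.length : Int) ≤ i) (h2 : i < l.length) :
    PySem.List.pySetD l i v = l.set (if i < 0 then i + l.length else i).toNat v := by
  by_cases h0 : 0 ≤ i
  · rw [PySem.List.pySetD_of_nonneg _ _ h0]
    simp [show ¬ i < 0 by omega]
  · simp only [PySem.List.pySetD, PySem.List.pySet?, PySem.List.pyIdx?]
    have hneg : i < 0 := by omega
    simp only [if_neg h0, if_pos h1, Option.map_some, Option.getD_some, if_pos hneg]
    congr 1
    omega

-- a scatter loop of List.set writes, characterised by the LAST matching index
theorem scatter_find {α : Type} (g : Nat → Nat) (w : Nat → α) :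
    ∀ (ks : List Nat) (acc : List α), (∀ k ∈ ks, g k < acc.length) → ∀ (t : Nat),
    (ks.foldl (fun nr k => nr.set (g k) (w k)) acc)[t]? =
      (match ks.reverse.find? (fun k => g k == t) with
       | some k => if t < acc.length then some (w k) else none
       | none => acc[t]?) := by
  intro ks
  induction ks with
  | nil => intro acc _ t; simp
  | cons k ks ih =>
    intro acc hg t
    have hlen : (acc.set (g k) (w k)).length = acc.length := by simp
    have hg' : ∀ k' ∈ ks, g k' < (acc.set (g k) (w k)).length := by
      intro k' hk'; rw [hlen]; exact hg k' (List.mem_cons_of_mem _ hk')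
    have := ih (acc.set (g k) (w k)) hg' t
    simp only [List.foldl_cons] at *
    rw [this, List.reverse_cons, List.find?_append]
    cases hfind : List.find? (fun k => g k == t) ks.reverse with
    | some k' => simp [hlen]
    | none =>
      by_cases he : g k = t
      · simp [List.find?, he, he ▸ hg k List.mem_cons_self]
      · simp [List.find?, show (g k == t) = false by simp [he], he]

theorem mem_of_nodup_bounded (L : List Nat) (n : Nat) (hL : L.Nodup) (hlen : L.length = n)
    (hsub : ∀ x ∈ L, x < n) (t : Nat) (ht : t < n) : t ∈ L := by
  have hsp : L.Subperm (List.range n) :=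
    List.subperm_of_subset hL (fun x hx => List.mem_range.mpr (hsub x hx))
  have hperm : L.Perm (List.range n) := hsp.perm_of_length_le (by simp [hlen])
  exact hperm.mem_iff.mpr (List.mem_range.mpr ht)

theorem foldl_pySetD_to_set {α : Type} (F : Nat → Int) (w : Nat → α) (N : Nat)
    (hF : ∀ k < N, -(N : Int) ≤ F k ∧ F k < N) :
    ∀ (ks : List Nat) (acc : List α), (∀ k ∈ ks, k < N) → acc.length = N →
    ks.foldl (fun nr k => PySem.List.pySetD nr (F k) (w k)) acc
      = ks.foldl (fun nr k => nr.set (if F k < 0 then F k + N else F k).toNat (w k)) acc := by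
  intro ks
  induction ks with
  | nil => intro acc _ _; rfl
  | cons k ks ih =>
    intro acc hks hacc
    have hk := hks k List.mem_cons_self
    have hFk := hF k hk
    simp only [List.foldl_cons]
    rw [pySetD_norm acc (F k) (w k) (by omega) (by omega), hacc,
        ih _ (fun k' hk' => hks k' (List.mem_cons_of_mem _ hk')) (by simp [hacc])]

-- the normalised targets, as a Nat-valued index map
theorem norm_targets_facts (cs : List Int) (n : Nat)
    (hbd : ∀ i < n, -(n : Int) ≤ cs.getD i 0 ∧ cs.getD i 0 < n)
    (hnd : ((List.range n).map (fun i =>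
        if cs.getD i 0 < 0 then cs.getD i 0 + n else cs.getD i 0)).Nodup) (t : Nat) (ht : t < n) :
    ∃ k0, ((List.range n).reverse.find? (fun k =>
        (if cs.getD k 0 < 0 then cs.getD k 0 + (n : Int) else cs.getD k 0).toNat == t)) = some k0 := by
  have hgbd : ∀ i < n, (if cs.getD i 0 < 0 then cs.getD i 0 + (n : Int) else cs.getD i 0).toNat < n := by
    intro i hi; have := hbd i hi; split_ifs <;> omega
  have hgnd : ((List.range n).map (fun k =>
      (if cs.getD k 0 < 0 then cs.getD k 0 + (n : Int) else cs.getD k 0).toNat)).Nodup := by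
    have heq : (List.range n).map (fun k =>
          (if cs.getD k 0 < 0 then cs.getD k 0 + (n : Int) else cs.getD k 0).toNat)
        = ((List.range n).map (fun k =>
          if cs.getD k 0 < 0 then cs.getD k 0 + (n : Int) else cs.getD k 0)).map Int.toNat := by
      simp [List.map_map, Function.comp_def]
    rw [heq]
    refine List.Nodup.map_on ?_ hnd
    intro x hx y hy hxy
    obtain ⟨i, hi, rfl⟩ := List.mem_map.mp hx
    obtain ⟨j, hj, rfl⟩ := List.mem_map.mp hy
    have h1 := hbd i (List.mem_range.mp hi)
    have h2 := hbd j (List.mem_range.mp hj)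
    split_ifs at hxy ⊢ <;> omega
  have hmem : t ∈ (List.range n).map (fun k =>
      (if cs.getD k 0 < 0 then cs.getD k 0 + (n : Int) else cs.getD k 0).toNat) :=
    mem_of_nodup_bounded _ n hgnd (by simp)
      (by intro x hx
          obtain ⟨i, hi, rfl⟩ := List.mem_map.mp hx
          exact hgbd i (List.mem_range.mp hi)) t ht
  obtain ⟨i0, hi0, hgi0⟩ := List.mem_map.mp hmem
  cases hfind : ((List.range n).reverse.find? (fun k =>
      (if cs.getD k 0 < 0 then cs.getD k 0 + (n : Int) else cs.getD k 0).toNat == t)) with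
  | some k0 => exact ⟨k0, rfl⟩
  | none =>
    exact absurd (by simpa using hgi0)
      (by simpa using List.find?_eq_none.mp hfind i0 (List.mem_reverse.mpr hi0))


-- the per-row equality: A's scatter into a None row = reading row r of B's reordered columns
theorem row_eq (cs : List Int) (n : Nat) (matrix : List (List Int)) (r : Nat)
    (hr : r < matrix.length) (hrow : (matrix.getD r []).length = n)
    (hbd : ∀ i < n, -(n : Int) ≤ cs.getD i 0 ∧ cs.getD i 0 < n)
    (hnd : ((List.range n).map (fun i =>
        if cs.getD i 0 < 0 then cs.getD i 0 + n else cs.getD i 0)).Nodup) :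
    (((PySem.List.enumerate (matrix.getD r [])).foldl
        (fun nr p => PySem.List.pySetD nr (PySem.List.pyGetD cs p.1 0) (some p.2))
        ((PySem.List.pyRange 0 ((n : Int)) 1).map (fun _ => (none : Option Int)))).map
      (fun o => o.getD 0))
    = ((PySem.List.pyRange 0 ((n : Int)) 1).foldl
         (fun cols i => PySem.List.pySetD cols (PySem.List.pyGetD cs i 0)
            (some (matrix.map (fun row => PySem.List.pyGetD row i 0))))
         (List.replicate n (none : Option (List Int)))).map
        (fun col => PySem.List.pyGetD (col.getD []) ((r : Nat) : Int) 0) := by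
  rw [PySem.List.enumerate_eq_map_pyRange (matrix.getD r []) 0]
  simp only [PySem.List.len_eq, hrow,
    PySem.List.pyRange_zero_natCast, List.foldl_map, PySem.List.pyGetD_natCast]
  rw [foldl_pySetD_to_set (fun k => cs.getD k 0) (fun k => some ((matrix.getD r []).getD k 0)) n hbd
        (List.range n) _ (fun k hk => List.mem_range.mp hk) (by simp),
      foldl_pySetD_to_set (fun k => cs.getD k 0)
        (fun k => some (matrix.map (fun row => row.getD k 0))) n hbd
        (List.range n) _ (fun k hk => List.mem_range.mp hk) (by simp)]
  have hgbd : ∀ k ∈ List.range n,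
      (if cs.getD k 0 < 0 then cs.getD k 0 + (n : Int) else cs.getD k 0).toNat < n := by
    intro k hk; have := hbd k (List.mem_range.mp hk); split_ifs <;> omega
  apply List.ext_getElem?
  intro t
  rw [List.getElem?_map, List.getElem?_map]
  rw [scatter_find (fun k => (if cs.getD k 0 < 0 then cs.getD k 0 + (n : Int) else cs.getD k 0).toNat)
        (fun k => some ((matrix.getD r []).getD k 0)) (List.range n) _ (by simpa using hgbd) t,
      scatter_find (fun k => (if cs.getD k 0 < 0 then cs.getD k 0 + (n : Int) else cs.getD k 0).toNat)
        (fun k => some (matrix.map (fun row => row.getD k 0))) (List.range n) _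
        (by simpa using hgbd) t]
  by_cases ht : t < n
  · obtain ⟨k0, hk0⟩ := norm_targets_facts cs n hbd hnd t ht
    rw [hk0]
    simp [ht, List.getD_eq_getElem?_getD, List.getElem?_map, List.getElem?_eq_getElem hr]
  · cases hfind : ((List.range n).reverse.find? (fun k =>
        (if cs.getD k 0 < 0 then cs.getD k 0 + (n : Int) else cs.getD k 0).toNat == t)) with
    | none => simp [Nat.le_of_not_lt ht]
    | some k => simp [ht]

-- ===== VERDICT (by name: the statement is the Claim_ definition above) =====
theorem reorder_column_spec : Claim_equal_reorder_column := by
  intro matrix column_order _hdom hpre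
  unfold Spec_reorder_column reorder_column reorder_column_alt
  obtain ⟨hrag, hlen, hbd, hnd⟩ := hpre
  cases matrix with
  | nil => rfl
  | cons r0 rest =>
    simp only [List.headD_cons] at hrag hbd hnd ⊢
    simp only [List.isEmpty_cons, Bool.false_eq_true, if_false]
    rw [PySem.List.foldl_append_singleton_eq_map, List.nil_append,
        PySem.List.pyRange_zero_natCast (r0 :: rest).length, List.map_map]
    apply List.ext_getElem?
    intro r
    rw [List.getElem?_map, List.getElem?_map]
    by_cases hr : r < (r0 :: rest).length
    · rw [List.getElem?_eq_getElem hr, List.getElem?_range hr]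
      simp only [Option.map_some, Function.comp_apply]
      have hgd : (r0 :: rest).getD r [] = (r0 :: rest)[r] := by
        rw [List.getD_eq_getElem?_getD, List.getElem?_eq_getElem hr]; rfl
      have := row_eq column_order r0.length (r0 :: rest) r hr
        (by rw [hgd]; exact hrag _ (List.getElem_mem hr)) hbd hnd
      rw [hgd] at this
      exact congrArg some this
    · rw [List.getElem?_eq_none (by simpa using Nat.le_of_not_lt hr),
          List.getElem?_eq_none (by simpa using Nat.le_of_not_lt hr)]
      rfl
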